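-- pv_equiv track=rewrite | github.com/mnopqr1/AoC2022 | day24/day24.py | parse
-- ===== SOURCE A (Python) =====
-- from itertools import product
-- from math import lcm
--
-- def parse(board) -> tuple[list[set[tuple[int,int]]], int, int, int]:
--     h, w = len(board), len(board[0])
--     p = lcm(h,w)
--     #obs = [dict() for _ in range(p)]
--     free = [set() for _ in range(p)]
--     # for x, y in product(range(w), range(h)):
--     #     for i in range(p):
--     #         # obs[i][(y,x)] = int(board[y][(x-i)%w] == ">") + \
--     #         #                 int(board[y][(x+i)%w] == "<") + \
--     #         #                 int(board[(y-i)%h][x] == "v") + \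
--     #         #                 int(board[(y+i)%h][x] == "^")
--     #         occupied = board[y][(x-i)%w] == ">" or board[y][(x+i)%w] == "<" or board[(y-i)%h][x] == "v" or board[(y+i)%h][x] == "^"
--     #         #obs[i][(y,x)] = occupied
--
--     for i in range(p):
--         free[i] = {(y,x)
--              for y,x in product(range(h),range(w))
--              if not (board[y][(x-i)%w] == ">" or board[y][(x+i)%w] == "<" or board[(y-i)%h][x] == "v" or board[(y+i)%h][x] == "^")}
--
--     return free, h, w, p
-- ===== SOURCE B (Python) =====
-- from math import lcm
--
--
-- def parse(board) -> tuple[list[set[tuple[int, int]]], int, int, int]: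
--     # Collect the blizzards once, then advance each one per time step
--     # instead of probing every cell's four source positions.
--     h, w = len(board), len(board[0])
--     p = lcm(h, w)
--     blizz = [(y, x, c)
--              for y, row in enumerate(board)
--              for x, c in enumerate(row[:w])
--              if c in "<>^v"]
--     all_cells = [(y, x) for y in range(h) for x in range(w)]
--     free = []
--     for i in range(p):
--         occ = set()
--         for y, x, c in blizz:
--             if c == '>':
--                 pos = (y, (x + i) % w)
--             elif c == '<':
--                 pos = (y, (x - i) % w)
--             elif c == 'v':
--                 pos = ((y + i) % h, x)
--             else:
--                 pos = ((y - i) % h, x)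
--             occ.add(pos)
--         free.append({cell for cell in all_cells if cell not in occ})
--     return free, h, w, p
-- ===== Notes on version B (the rewrite author's own statement) =====
-- stated objective: alternative
-- what changed: Instead of testing, for every cell and time step, the four source positions a blizzard would have to start from, B scans the board once to collect the blizzards and per time step advances each blizzard to its current position, taking the free cells as all cells minus the occupied set.
import Mathlib
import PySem

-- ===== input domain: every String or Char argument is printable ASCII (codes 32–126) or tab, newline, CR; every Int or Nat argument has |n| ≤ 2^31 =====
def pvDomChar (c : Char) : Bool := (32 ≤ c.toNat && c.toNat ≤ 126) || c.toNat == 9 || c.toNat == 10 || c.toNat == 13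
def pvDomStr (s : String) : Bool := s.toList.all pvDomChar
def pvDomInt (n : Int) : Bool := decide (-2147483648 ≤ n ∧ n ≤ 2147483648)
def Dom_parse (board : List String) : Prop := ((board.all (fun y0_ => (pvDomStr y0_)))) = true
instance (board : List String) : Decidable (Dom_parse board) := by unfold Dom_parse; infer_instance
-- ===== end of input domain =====

-- B collects the blizzards once and advances each of them per time step instead of
-- probing every cell's four source positions (alternative decomposition, same cost class).

-- ===== PORT A =====
def parse (board : List String) : (List (List (Int × Int))) × Int × Int × Int :=
  let h : Int := (board.length : Int)
  let w : Int := PySem.Str.len (PySem.List.pyGetD board 0 "")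
  let p : Int := ((Nat.lcm board.length w.toNat : Nat) : Int)
  let free : List (List (Int × Int)) :=
    (PySem.List.pyRange 0 p 1).map (fun i =>
      PySem.Set.ofList
        (((PySem.List.pyRange 0 h 1).flatMap (fun y =>
            (PySem.List.pyRange 0 w 1).map (fun x => (y, x)))).filter
          (fun c =>
            !( ((PySem.Str.pyGet? (PySem.List.pyGetD board c.1 "") (PySem.Int.mod (c.2 - i) w)).getD ' ' == '>')
             || ((PySem.Str.pyGet? (PySem.List.pyGetD board c.1 "") (PySem.Int.mod (c.2 + i) w)).getD ' ' == '<')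
             || ((PySem.Str.pyGet? (PySem.List.pyGetD board (PySem.Int.mod (c.1 - i) h) "") c.2).getD ' ' == 'v')
             || ((PySem.Str.pyGet? (PySem.List.pyGetD board (PySem.Int.mod (c.1 + i) h) "") c.2).getD ' ' == '^')))))
  (free, h, w, p)

-- ===== PORT B =====
-- one blizzard (y, x, c) advanced i steps (the if/elif chain of Source B)
def pvMove (w h i : Int) (b : Int × Int × Char) : Int × Int :=
  if b.2.2 == '>' then (b.1, PySem.Int.mod (b.2.1 + i) w)
  else if b.2.2 == '<' then (b.1, PySem.Int.mod (b.2.1 - i) w)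
  else if b.2.2 == 'v' then (PySem.Int.mod (b.1 + i) h, b.2.1)
  else (PySem.Int.mod (b.1 - i) h, b.2.1)

def parse_alt (board : List String) : (List (List (Int × Int))) × Int × Int × Int :=
  let h : Int := (board.length : Int)
  let w : Int := PySem.Str.len (PySem.List.pyGetD board 0 "")
  let p : Int := ((Nat.lcm board.length w.toNat : Nat) : Int)
  -- single-character 'c in "<>^v"' is list membership of the char
  let blizz : List (Int × Int × Char) :=
    (PySem.List.enumerate board).flatMap (fun yr =>
      ((PySem.List.enumerate (PySem.List.slice yr.2.toList none (some w))).filter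
          (fun xc => "<>^v".toList.contains xc.2)).map (fun xc => (yr.1, xc.1, xc.2)))
  let allCells : List (Int × Int) :=
    (PySem.List.pyRange 0 h 1).flatMap (fun y => (PySem.List.pyRange 0 w 1).map (fun x => (y, x)))
  let free : List (List (Int × Int)) :=
    (PySem.List.pyRange 0 p 1).map (fun i =>
      let occ : PySem.Set (Int × Int) :=
        blizz.foldl (fun s b => PySem.Set.add s (pvMove w h i b)) PySem.Set.empty
      PySem.Set.ofList (allCells.filter (fun cell => !(PySem.Set.contains occ cell))))
  (free, h, w, p)

-- ===== PRECONDITION & SPEC =====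
-- Pre_ excludes exactly the boards on which A raises IndexError: the empty board
-- (board[0]) and boards with a row shorter than the first row (board[y][j] for j < w).
def Pre_parse (board : List String) : Prop :=
  board ≠ [] ∧ ∀ s ∈ board, (board.getD 0 "").toList.length ≤ s.toList.length
instance (board : List String) : Decidable (Pre_parse board) := by unfold Pre_parse; infer_instance
def pvWitness_parse : List String := [">"]

def Spec_parse (board : List String) (out : (List (List (Int × Int))) × Int × Int × Int) : Prop := out = parse_alt board
instance (board : List String) (out : (List (List (Int × Int))) × Int × Int × Int) : Decidable (Spec_parse board out) := by unfold Spec_parse; infer_instance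

-- ===== CLAIM (what is proved, stated in full; the proofs are below) =====
def Claim_equal_parse : Prop := ∀ (board : List String), Dom_parse board → Pre_parse board → Spec_parse board (parse board)

-- ===== LEMMAS AND PROOFS =====

def pvCC (board : List String) (k m : Nat) : Char := ((board.getD k "").toList).getD m ' '

theorem pvCC_eq (board : List String) (k m : Nat) (hk : k < board.length)
    (hm : m < board[k].toList.length) : pvCC board k m = board[k].toList[m] := by
  unfold pvCC
  rw [List.getD_eq_getElem board "" hk, List.getD_eq_getElem _ ' ' hm]

theorem pv_blizz_mem (board : List String)
    (hpre : ∀ s ∈ board, (board.getD 0 "").toList.length ≤ s.toList.length)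
    (b : Int × Int × Char) :
    (b ∈ (PySem.List.enumerate board).flatMap (fun yr =>
      ((PySem.List.enumerate (PySem.List.slice yr.2.toList none (some (PySem.Str.len (PySem.List.pyGetD board 0 ""))))).filter
          (fun xc => "<>^v".toList.contains xc.2)).map (fun xc => (yr.1, xc.1, xc.2))))
    ↔ ∃ (k m : Nat), k < board.length ∧ m < (board.getD 0 "").toList.length ∧
        b = ((k : Int), (m : Int), pvCC board k m) ∧ ("<>^v".toList.contains (pvCC board k m) = true) := by
  have hlen : PySem.Str.len (PySem.List.pyGetD board 0 "") = ((board.getD 0 "").toList.length : Int) := by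
    simp [PySem.List.pyGetD_zero]
  rw [hlen]
  simp only [List.mem_flatMap, PySem.List.mem_enumerate_iff, List.mem_map, List.mem_filter,
    PySem.List.slice_to _ (Int.natCast_nonneg _), Int.toNat_natCast]
  constructor
  · rintro ⟨yr, ⟨k, hk, rfl⟩, xc, ⟨⟨m, hm, rfl⟩, hc⟩, rfl⟩
    rw [List.length_take, lt_min_iff] at hm
    have hget : (List.take (board.getD 0 "").toList.length (((0:Int) + (k:Int), board[k]).2.toList))[m]'(by
        rw [List.length_take]; exact lt_min_iff.mpr hm) = pvCC board k m := by
      simp only [List.getElem_take]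
      exact (pvCC_eq board k m hk hm.2).symm
    refine ⟨k, m, hk, hm.1, ?_, ?_⟩
    · simpa using (pvCC_eq board k m hk hm.2).symm
    · simpa [pvCC_eq board k m hk hm.2] using hc
  · rintro ⟨k, m, hk, hm, rfl, hc⟩
    have hmlen : m < board[k].toList.length := lt_of_lt_of_le hm (hpre board[k] (by simp))
    have hb : m < (List.take (board.getD 0 "").toList.length board[k].toList).length := by
      rw [List.length_take]; exact lt_min_iff.mpr ⟨hm, hmlen⟩
    have hget : (List.take (board.getD 0 "").toList.length board[k].toList)[m]'hb = pvCC board k m := by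
      simp only [List.getElem_take]
      exact (pvCC_eq board k m hk hmlen).symm
    refine ⟨((k:Int), board[k]), ⟨k, hk, by simp⟩,
      ((m:Int), (List.take (board.getD 0 "").toList.length board[k].toList)[m]'hb),
      ⟨⟨m, by simpa using hb, by simp⟩, by simpa [pvCC_eq board k m hk hmlen] using hc⟩,
      by simpa using (pvCC_eq board k m hk hmlen).symm⟩

theorem pv_gch (board : List String) (y j : Int) (hy0 : 0 ≤ y) (hy : y.toNat < board.length)
    (hj0 : 0 ≤ j) (hj : j.toNat < (board[y.toNat].toList).length) :
    (PySem.Str.pyGet? (PySem.List.pyGetD board y "") j).getD ' ' = board[y.toNat].toList[j.toNat] := by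
  rw [PySem.List.pyGetD_eq_getElem board "" hy0 (by omega)]
  simp [PySem.Str.pyGet?]
  rw [PySem.List.pyGet?_eq_some_getElem _ hj0 (by omega)]
  rfl

theorem pv_gch2 (board : List String)
    (hpre : ∀ s ∈ board, (board.getD 0 "").toList.length ≤ s.toList.length)
    (u v : Int) (hu0 : 0 ≤ u) (hu : u < (board.length : Int))
    (hv0 : 0 ≤ v) (hv : v < ((board.getD 0 "").toList.length : Int)) :
    (PySem.Str.pyGet? (PySem.List.pyGetD board u "") v).getD ' ' = pvCC board u.toNat v.toNat := by
  have hk : u.toNat < board.length := by omega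
  have hrow : v.toNat < board[u.toNat].toList.length :=
    lt_of_lt_of_le (by omega) (hpre board[u.toNat] (by simp))
  rw [pv_gch board u v hu0 hk hv0 hrow]
  exact (pvCC_eq board u.toNat v.toNat hk hrow).symm

-- membership in a fold of Set.add over a mapped list
theorem pv_mem_foldl_add {α β : Type} [BEq β] [LawfulBEq β] (f : α → β) (x : β) :
    ∀ (l : List α) (s : PySem.Set β),
      (x ∈ l.foldl (fun s b => PySem.Set.add s (f b)) s) ↔ x ∈ s ∨ ∃ b ∈ l, f b = x := by
  intro l
  induction l with
  | nil => simp
  | cons a t ih =>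
    intro s
    simp [List.foldl_cons, ih, PySem.Set.mem_add]
    tauto

theorem pv_mod_shift (w a b : Int) (hw : 0 < w) :
    PySem.Int.mod (PySem.Int.mod a w + b) w = PySem.Int.mod (a + b) w := by
  simp [PySem.Int.mod_eq_emod_of_pos hw]

theorem pv_mod_id (w a : Int) (hw : 0 < w) (h0 : 0 ≤ a) (h1 : a < w) :
    PySem.Int.mod a w = a := by
  rw [PySem.Int.mod_eq_emod_of_pos hw]
  exact Int.emod_eq_of_lt h0 h1

theorem pv_center (board : List String)
    (hpre : ∀ s ∈ board, (board.getD 0 "").toList.length ≤ s.toList.length)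
    (i y x : Int) (hy0 : 0 ≤ y) (hy : y < (board.length : Int))
    (hx0 : 0 ≤ x) (hx : x < PySem.Str.len (PySem.List.pyGetD board 0 "")) :
    (PySem.Set.contains
      (((PySem.List.enumerate board).flatMap (fun yr =>
          ((PySem.List.enumerate (PySem.List.slice yr.2.toList none (some (PySem.Str.len (PySem.List.pyGetD board 0 ""))))).filter
              (fun xc => "<>^v".toList.contains xc.2)).map (fun xc => (yr.1, xc.1, xc.2)))).foldl
        (fun s b => PySem.Set.add s (pvMove (PySem.Str.len (PySem.List.pyGetD board 0 "")) (board.length : Int) i b)) PySem.Set.empty)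
      (y, x))
    = ( ((PySem.Str.pyGet? (PySem.List.pyGetD board y "") (PySem.Int.mod (x - i) (PySem.Str.len (PySem.List.pyGetD board 0 "")))).getD ' ' == '>')
      || ((PySem.Str.pyGet? (PySem.List.pyGetD board y "") (PySem.Int.mod (x + i) (PySem.Str.len (PySem.List.pyGetD board 0 "")))).getD ' ' == '<')
      || ((PySem.Str.pyGet? (PySem.List.pyGetD board (PySem.Int.mod (y - i) (board.length : Int)) "") x).getD ' ' == 'v')
      || ((PySem.Str.pyGet? (PySem.List.pyGetD board (PySem.Int.mod (y + i) (board.length : Int)) "") x).getD ' ' == '^')) := by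
  have hlen : PySem.Str.len (PySem.List.pyGetD board 0 "") = ((board.getD 0 "").toList.length : Int) := by
    simp [PySem.List.pyGetD_zero]
  have hw : (0:Int) < ((board.getD 0 "").toList.length : Int) := by rw [hlen] at hx; omega
  have hh : (0:Int) < (board.length : Int) := by omega
  rw [Bool.eq_iff_iff, PySem.Set.contains_iff, pv_mem_foldl_add]
  rw [pv_gch2 board hpre y _ hy0 hy (PySem.Int.mod_nonneg _ (hlen ▸ hw)) (hlen ▸ PySem.Int.mod_lt _ (hlen ▸ hw)),
      pv_gch2 board hpre y _ hy0 hy (PySem.Int.mod_nonneg _ (hlen ▸ hw)) (hlen ▸ PySem.Int.mod_lt _ (hlen ▸ hw)),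
      pv_gch2 board hpre _ x (PySem.Int.mod_nonneg _ hh) (PySem.Int.mod_lt _ hh) hx0 (hlen ▸ hx),
      pv_gch2 board hpre _ x (PySem.Int.mod_nonneg _ hh) (PySem.Int.mod_lt _ hh) hx0 (hlen ▸ hx)]
  simp only [PySem.Set.empty, List.not_mem_nil, false_or, pv_blizz_mem board hpre,
    Bool.or_eq_true, beq_iff_eq]
  rw [hlen]
  constructor
  · rintro ⟨b, ⟨k, m, hk, hm, rfl, hc⟩, hmove⟩
    rw [show "<>^v".toList = ['<','>','^','v'] from rfl] at hc
    simp at hc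
    have hmW : ((m:Int)) < ((board.getD 0 "").toList.length : Int) := by exact_mod_cast hm
    rcases hc with hcc | hcc | hcc | hcc
    · -- '<' : second disjunct
      refine Or.inl (Or.inl (Or.inr ?_))
      rw [hcc] at hmove
      have hmv : (((k:Int)), PySem.Int.mod ((m:Int) - i) ((board.getD 0 "").toList.length : Int)) = (y, x) := hmove
      injection hmv with hky hmx
      have h1 : PySem.Int.mod (x + i) ((board.getD 0 "").toList.length : Int) = (m:Int) := by
        rw [← hmx, sub_eq_add_neg, pv_mod_shift _ _ _ hw]
        have he : (m:Int) + -i + i = (m:Int) := by ring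
        rw [he, pv_mod_id _ _ hw (by positivity) hmW]
      rw [h1, ← hky]
      simpa using hcc
    · -- '>' : first disjunct
      refine Or.inl (Or.inl (Or.inl ?_))
      rw [hcc] at hmove
      have hmv : (((k:Int)), PySem.Int.mod ((m:Int) + i) ((board.getD 0 "").toList.length : Int)) = (y, x) := hmove
      injection hmv with hky hmx
      have h1 : PySem.Int.mod (x - i) ((board.getD 0 "").toList.length : Int) = (m:Int) := by
        rw [← hmx, sub_eq_add_neg, pv_mod_shift _ _ _ hw]
        have he : (m:Int) + i + -i = (m:Int) := by ring
        rw [he, pv_mod_id _ _ hw (by positivity) hmW]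
      rw [h1, ← hky]
      simpa using hcc
    · -- '^' : fourth disjunct
      refine Or.inr ?_
      rw [hcc] at hmove
      have hmv : (PySem.Int.mod ((k:Int) - i) (board.length : Int), ((m:Int))) = (y, x) := hmove
      injection hmv with hky hmx
      have h1 : PySem.Int.mod (y + i) (board.length : Int) = (k:Int) := by
        rw [← hky, sub_eq_add_neg, pv_mod_shift _ _ _ hh]
        have he : (k:Int) + -i + i = (k:Int) := by ring
        rw [he, pv_mod_id _ _ hh (by positivity) (by exact_mod_cast hk)]
      rw [h1, ← hmx]
      simpa using hcc
    · -- 'v' : third disjunct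
      refine Or.inl (Or.inr ?_)
      rw [hcc] at hmove
      have hmv : (PySem.Int.mod ((k:Int) + i) (board.length : Int), ((m:Int))) = (y, x) := hmove
      injection hmv with hky hmx
      have h1 : PySem.Int.mod (y - i) (board.length : Int) = (k:Int) := by
        rw [← hky, sub_eq_add_neg, pv_mod_shift _ _ _ hh]
        have he : (k:Int) + i + -i = (k:Int) := by ring
        rw [he, pv_mod_id _ _ hh (by positivity) (by exact_mod_cast hk)]
      rw [h1, ← hmx]
      simpa using hcc
  · have hyk : ((y.toNat : Int)) = y := Int.toNat_of_nonneg hy0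
    have hxk : ((x.toNat : Int)) = x := Int.toNat_of_nonneg hx0
    rintro (((h1 | h1) | h1) | h1)
    · -- '>' blizzard at (y, (x-i)%w)
      have hj0 : 0 ≤ PySem.Int.mod (x - i) ((board.getD 0 "").toList.length : Int) := PySem.Int.mod_nonneg _ hw
      have hjlt := PySem.Int.mod_lt (x - i) hw
      have hjk := Int.toNat_of_nonneg hj0
      refine ⟨((y.toNat : Int), ((PySem.Int.mod (x - i) ((board.getD 0 "").toList.length : Int)).toNat : Int),
          pvCC board y.toNat (PySem.Int.mod (x - i) ((board.getD 0 "").toList.length : Int)).toNat),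
        ⟨y.toNat, _, by omega, by omega, rfl, by rw [h1]; decide⟩, ?_⟩
      rw [h1]
      show ((y.toNat : Int), PySem.Int.mod (((PySem.Int.mod (x - i) ((board.getD 0 "").toList.length : Int)).toNat : Int) + i) ((board.getD 0 "").toList.length : Int)) = (y, x)
      rw [hjk, pv_mod_shift _ _ _ hw, sub_add_cancel, pv_mod_id _ _ hw hx0 (hlen ▸ hx), hyk]
    · -- '<' blizzard at (y, (x+i)%w)
      have hj0 : 0 ≤ PySem.Int.mod (x + i) ((board.getD 0 "").toList.length : Int) := PySem.Int.mod_nonneg _ hw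
      have hjlt := PySem.Int.mod_lt (x + i) hw
      have hjk := Int.toNat_of_nonneg hj0
      refine ⟨((y.toNat : Int), ((PySem.Int.mod (x + i) ((board.getD 0 "").toList.length : Int)).toNat : Int),
          pvCC board y.toNat (PySem.Int.mod (x + i) ((board.getD 0 "").toList.length : Int)).toNat),
        ⟨y.toNat, _, by omega, by omega, rfl, by rw [h1]; decide⟩, ?_⟩
      rw [h1]
      show ((y.toNat : Int), PySem.Int.mod (((PySem.Int.mod (x + i) ((board.getD 0 "").toList.length : Int)).toNat : Int) - i) ((board.getD 0 "").toList.length : Int)) = (y, x)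
      rw [hjk, sub_eq_add_neg, pv_mod_shift _ _ _ hw]
      have he : x + i + -i = x := by ring
      rw [he, pv_mod_id _ _ hw hx0 (hlen ▸ hx), hyk]
    · -- 'v' blizzard at ((y-i)%h, x)
      have hj0 : 0 ≤ PySem.Int.mod (y - i) (board.length : Int) := PySem.Int.mod_nonneg _ hh
      have hjlt := PySem.Int.mod_lt (y - i) hh
      have hjk := Int.toNat_of_nonneg hj0
      refine ⟨(((PySem.Int.mod (y - i) (board.length : Int)).toNat : Int), (x.toNat : Int),
          pvCC board (PySem.Int.mod (y - i) (board.length : Int)).toNat x.toNat),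
        ⟨_, x.toNat, by omega, by rw [hlen] at hx; omega, rfl, by rw [h1]; decide⟩, ?_⟩
      rw [h1]
      show (PySem.Int.mod (((PySem.Int.mod (y - i) (board.length : Int)).toNat : Int) + i) (board.length : Int), (x.toNat : Int)) = (y, x)
      rw [hjk, pv_mod_shift _ _ _ hh, sub_add_cancel, pv_mod_id _ _ hh hy0 hy, hxk]
    · -- '^' blizzard at ((y+i)%h, x)
      have hj0 : 0 ≤ PySem.Int.mod (y + i) (board.length : Int) := PySem.Int.mod_nonneg _ hh
      have hjlt := PySem.Int.mod_lt (y + i) hh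
      have hjk := Int.toNat_of_nonneg hj0
      refine ⟨(((PySem.Int.mod (y + i) (board.length : Int)).toNat : Int), (x.toNat : Int),
          pvCC board (PySem.Int.mod (y + i) (board.length : Int)).toNat x.toNat),
        ⟨_, x.toNat, by omega, by rw [hlen] at hx; omega, rfl, by rw [h1]; decide⟩, ?_⟩
      rw [h1]
      show (PySem.Int.mod (((PySem.Int.mod (y + i) (board.length : Int)).toNat : Int) - i) (board.length : Int), (x.toNat : Int)) = (y, x)
      rw [hjk, sub_eq_add_neg, pv_mod_shift _ _ _ hh]
      have he : y + i + -i = y := by ring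
      rw [he, pv_mod_id _ _ hh hy0 hy, hxk]

theorem parse_spec_aux (board : List String)
    (hpre : ∀ s ∈ board, (board.getD 0 "").toList.length ≤ s.toList.length) :
    parse board = parse_alt board := by
  simp only [parse, parse_alt]
  congr 1
  apply List.map_congr_left
  intro i hi
  rw [PySem.List.mem_pyRange_one] at hi
  congr 1
  apply List.filter_congr
  intro c hc
  simp only [List.mem_flatMap, List.mem_map, PySem.List.mem_pyRange_one] at hc
  obtain ⟨yv, hyv, xv, hxv, rfl⟩ := hc
  dsimp only
  exact congrArg Bool.not (pv_center board hpre i yv xv hyv.1 hyv.2 hxv.1 hxv.2).symm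

-- ===== VERDICT (by name: the statement is the Claim_ definition above) =====
theorem parse_spec : Claim_equal_parse := by
  intro board _ hpre
  unfold Spec_parse
  exact parse_spec_aux board hpre.2
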